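-- pv_equiv track=rewrite | github.com/Timjaris/A-Bunch-of-Miscellaneous-Programs | SavingTheWorld.py | getDamage
-- ===== SOURCE A (Python) =====
-- def getDamage(s):
--     strenth = 1
--     damage = 0
--     for c in s:
--         if c=='C':
--             strenth*=2
--         if c=='S':
--             damage+=strenth
--     return damage
-- ===== SOURCE B (Python) =====
-- def getDamage(s):
--     damage = 0
--     for c in reversed(s):
--         if c == 'S':
--             damage += 1
--         elif c == 'C':
--             damage *= 2
--     return damage
-- ===== Notes on version B (the rewrite author's own statement) =====
-- stated objective: simpler
-- what changed: B scans the string right-to-left with a single accumulator, doubling it in place on 'C' instead of maintaining A's separate running strength multiplier.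
import Mathlib
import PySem

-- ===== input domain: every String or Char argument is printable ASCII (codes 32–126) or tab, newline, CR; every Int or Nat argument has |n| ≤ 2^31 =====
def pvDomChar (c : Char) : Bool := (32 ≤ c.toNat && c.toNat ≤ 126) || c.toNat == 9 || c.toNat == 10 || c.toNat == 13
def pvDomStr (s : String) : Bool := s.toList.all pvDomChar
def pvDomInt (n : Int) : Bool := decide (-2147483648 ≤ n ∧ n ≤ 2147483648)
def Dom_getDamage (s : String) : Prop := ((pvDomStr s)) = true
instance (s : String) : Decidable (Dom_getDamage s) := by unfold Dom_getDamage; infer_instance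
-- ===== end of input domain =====

-- ===== PORT A =====
-- A: left-to-right fold carrying (strength, damage)
def getDamage (s : String) : Int :=
  (s.toList.foldl (fun (st : Int × Int) c =>
    let st1 := if c = 'C' then (2 * st.1, st.2) else st
    if c = 'S' then (st1.1, st1.2 + st1.1) else st1) (1, 0)).2

-- ===== PORT B =====
-- B: right-to-left scan with a single accumulator (for c in reversed(s) = foldr)
def getDamage_alt (s : String) : Int :=
  s.toList.foldr (fun c d => if c = 'S' then d + 1 else if c = 'C' then 2 * d else d) 0

-- ===== PRECONDITION & SPEC =====
def Spec_getDamage (s : String) (out : Int) : Prop := out = getDamage_alt s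
instance (s : String) (out : Int) : Decidable (Spec_getDamage s out) := by unfold Spec_getDamage; infer_instance

-- ===== CLAIM (what is proved, stated in full; the proofs are below) =====
def Claim_equal_getDamage : Prop := ∀ (s : String), Dom_getDamage s → Spec_getDamage s (getDamage s)

-- ===== LEMMAS AND PROOFS =====

-- ===== VERDICT (by name: the statement is the Claim_ definition above) =====
-- invariant: A's fold from state (st, dm) over l has final damage dm + st * B(l)
theorem getDamage_inv (l : List Char) : ∀ (st dm : Int),
    (l.foldl (fun (p : Int × Int) c =>
      let st1 := if c = 'C' then (2 * p.1, p.2) else p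
      if c = 'S' then (st1.1, st1.2 + st1.1) else st1) (st, dm)).2
    = dm + st * l.foldr (fun c d => if c = 'S' then d + 1 else if c = 'C' then 2 * d else d) 0 := by
  induction l with
  | nil => intro st dm; simp
  | cons c t ih =>
    intro st dm
    by_cases hS : c = 'S'
    · simp [List.foldl, List.foldr, hS, ih]; ring
    · by_cases hC : c = 'C'
      · simp [List.foldl, List.foldr, hC, ih]; ring
      · simp [List.foldl, List.foldr, hS, hC, ih]

theorem getDamage_spec : Claim_equal_getDamage := by
  intro s _
  unfold Spec_getDamage getDamage getDamage_alt
  rw [getDamage_inv]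
  ring
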